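-- pv_equiv track=rewrite | github.com/AppLetico/prscope | src/prscope/planning/runtime/authoring/validation.py | _prioritized_frontend_tests
-- ===== SOURCE A (Python) =====
-- def _prioritized_frontend_tests(paths: list[str]) -> list[str]:
--     def _score(path: str) -> tuple[int, str]:
--         normalized = str(path).strip()
--         if "/pages/" in normalized:
--             return (0, normalized)
--         if "/components/" in normalized:
--             return (1, normalized)
--         if "/lib/" in normalized:
--             return (3, normalized)
--         return (2, normalized)
--
--     return [path for _, path in sorted((_score(path) for path in paths), key=lambda item: item[0])]
-- ===== SOURCE B (Python) =====
-- def _prioritized_frontend_tests(paths: list[str]) -> list[str]: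
--     # Bucket sort: four fixed priority buckets filled in one pass, input order kept
--     # (exactly what a stable sort on a 4-valued key produces).
--     pages, components, other, lib = [], [], [], []
--     for path in paths:
--         s = str(path).strip()
--         if "/pages/" in s:
--             pages.append(s)
--         elif "/components/" in s:
--             components.append(s)
--         elif "/lib/" in s:
--             lib.append(s)
--         else:
--             other.append(s)
--     return pages + components + other + lib
-- ===== Notes on version B (the rewrite author's own statement) =====
-- stated objective: alternative
-- what changed: Replaces the comparison sort over (score, path) tuples by a single-pass bucket sort into the four fixed priority buckets, concatenated in priority order (stability of A's sort gives the same output).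
import Mathlib
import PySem

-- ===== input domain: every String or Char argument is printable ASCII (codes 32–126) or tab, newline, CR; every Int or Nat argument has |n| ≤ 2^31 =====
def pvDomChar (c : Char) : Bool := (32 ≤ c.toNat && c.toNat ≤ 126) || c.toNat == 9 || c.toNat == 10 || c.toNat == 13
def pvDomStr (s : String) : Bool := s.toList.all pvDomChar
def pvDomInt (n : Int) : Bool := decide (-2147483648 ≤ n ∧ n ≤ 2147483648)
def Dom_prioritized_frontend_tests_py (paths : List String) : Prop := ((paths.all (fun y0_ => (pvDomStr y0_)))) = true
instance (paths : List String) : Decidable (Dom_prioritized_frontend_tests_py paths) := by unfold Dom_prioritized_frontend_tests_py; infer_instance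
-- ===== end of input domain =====

-- B replaces A's stable comparison sort on a 4-valued key by a one-pass bucket
-- sort into four priority buckets, concatenated in priority order.


-- ===== PORT A =====
-- A's inner helper _score
def pvScore (path : String) : Int × String :=
  let normalized := PySem.Str.strip path
  if PySem.Str.isIn "/pages/" normalized then (0, normalized)
  else if PySem.Str.isIn "/components/" normalized then (1, normalized)
  else if PySem.Str.isIn "/lib/" normalized then (3, normalized)
  else (2, normalized)

def prioritized_frontend_tests_py (paths : List String) : List String :=
  (PySem.List.sorted (paths.map pvScore) (fun item => item.1) false).map (fun p => p.2)

-- ===== PORT B =====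
-- one loop iteration of Source B: strip, then append to the matching bucket
def pvBucketStep (acc : List String × List String × List String × List String)
    (path : String) : List String × List String × List String × List String :=
  let s := PySem.Str.strip path
  if PySem.Str.isIn "/pages/" s then (acc.1 ++ [s], acc.2.1, acc.2.2.1, acc.2.2.2)
  else if PySem.Str.isIn "/components/" s then (acc.1, acc.2.1 ++ [s], acc.2.2.1, acc.2.2.2)
  else if PySem.Str.isIn "/lib/" s then (acc.1, acc.2.1, acc.2.2.1, acc.2.2.2 ++ [s])
  else (acc.1, acc.2.1, acc.2.2.1 ++ [s], acc.2.2.2)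

def prioritized_frontend_tests_py_alt (paths : List String) : List String :=
  let b := paths.foldl pvBucketStep ([], [], [], [])
  b.1 ++ b.2.1 ++ b.2.2.1 ++ b.2.2.2

-- ===== PRECONDITION & SPEC =====
def Spec_prioritized_frontend_tests_py (paths : List String) (out : List String) : Prop := out = prioritized_frontend_tests_py_alt paths
instance (paths : List String) (out : List String) : Decidable (Spec_prioritized_frontend_tests_py paths out) := by unfold Spec_prioritized_frontend_tests_py; infer_instance

-- ===== CLAIM (what is proved, stated in full; the proofs are below) =====
def Claim_equal_prioritized_frontend_tests_py : Prop := ∀ (paths : List String), Dom_prioritized_frontend_tests_py paths → Spec_prioritized_frontend_tests_py paths (prioritized_frontend_tests_py paths)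

-- ===== LEMMAS AND PROOFS =====

lemma insertBy_all_before {α : Type} (before : α → α → Bool) (x : α) (ys : List α)
    (h : ∀ y ∈ ys, before x y = true) :
    PySem.List.insertBy before x ys = x :: ys := by
  cases ys with
  | nil => simp [PySem.List.insertBy]
  | cons y t => simp [PySem.List.insertBy, h y (by simp)]

lemma insertBy_split {α : Type} (before : α → α → Bool) (x : α) (A B : List α)
    (hA : ∀ a ∈ A, before x a = false) (hB : ∀ b ∈ B, before x b = true) :
    PySem.List.insertBy before x (A ++ B) = A ++ x :: B := by
  induction A with
  | nil => simpa using insertBy_all_before before x B hB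
  | cons a t ih =>
      have ha : before x a = false := hA a (by simp)
      simp [PySem.List.insertBy, ha, ih (fun a h => hA a (by simp [h]))]

-- the keys A's _score can produce
lemma pvScore_key (s : String) :
    (pvScore s).1 = 0 ∨ (pvScore s).1 = 1 ∨ (pvScore s).1 = 2 ∨ (pvScore s).1 = 3 := by
  simp only [pvScore]
  split_ifs <;> simp

-- insertion-sort invariant: four key-segments, each insertion appends to its segment
lemma foldl_insertBy_buckets :
    ∀ (l B0 B1 B2 B3 : List (Int × String)),
      (∀ p ∈ B0, p.1 = 0) → (∀ p ∈ B1, p.1 = 1) → (∀ p ∈ B2, p.1 = 2) → (∀ p ∈ B3, p.1 = 3) →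
      (∀ p ∈ l, p.1 = 0 ∨ p.1 = 1 ∨ p.1 = 2 ∨ p.1 = 3) →
      l.foldl (fun acc x => PySem.List.insertBy (fun a b => decide (a.1 < b.1)) x acc)
        (B0 ++ B1 ++ B2 ++ B3)
      = (B0 ++ l.filter (fun p => p.1 == 0)) ++ (B1 ++ l.filter (fun p => p.1 == 1))
        ++ (B2 ++ l.filter (fun p => p.1 == 2)) ++ (B3 ++ l.filter (fun p => p.1 == 3)) := by
  intro l
  induction l with
  | nil => intro B0 B1 B2 B3 _ _ _ _ _; simp
  | cons x t ih =>
      intro B0 B1 B2 B3 h0 h1 h2 h3 hl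
      have hx := hl x (by simp)
      have ht : ∀ p ∈ t, p.1 = 0 ∨ p.1 = 1 ∨ p.1 = 2 ∨ p.1 = 3 := fun p hp => hl p (by simp [hp])
      rcases hx with hx | hx | hx | hx
      · have hstep : PySem.List.insertBy (fun a b => decide (a.1 < b.1)) x (B0 ++ B1 ++ B2 ++ B3)
            = (B0 ++ [x]) ++ B1 ++ B2 ++ B3 := by
          have := insertBy_split (fun a b : Int × String => decide (a.1 < b.1)) x B0 (B1 ++ B2 ++ B3)
            (fun a ha => by simp [h0 a ha, hx])
            (fun b hb => by
              simp only [List.append_assoc, List.mem_append] at hb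
              rcases hb with hb | hb | hb
              · simp [h1 b hb, hx]
              · simp [h2 b hb, hx]
              · simp [h3 b hb, hx])
          simp only [List.append_assoc] at this ⊢
          simpa using this
        have hnew : ∀ p ∈ B0 ++ [x], p.1 = 0 := by
          intro p hp
          rcases List.mem_append.1 hp with hp | hp
          · exact h0 p hp
          · have hpx : p = x := by simpa using hp
            rw [hpx]; exact hx
        simp only [List.foldl_cons, hstep]
        rw [ih (B0 ++ [x]) B1 B2 B3 hnew h1 h2 h3 ht]
        simp [hx, List.append_assoc]
      · have hstep : PySem.List.insertBy (fun a b => decide (a.1 < b.1)) x (B0 ++ B1 ++ B2 ++ B3)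
            = B0 ++ (B1 ++ [x]) ++ B2 ++ B3 := by
          have := insertBy_split (fun a b : Int × String => decide (a.1 < b.1)) x (B0 ++ B1) (B2 ++ B3)
            (fun a ha => by
              rcases List.mem_append.1 ha with ha | ha
              · simp [h0 a ha, hx]
              · simp [h1 a ha, hx])
            (fun b hb => by
              rcases List.mem_append.1 hb with hb | hb
              · simp [h2 b hb, hx]
              · simp [h3 b hb, hx])
          simp only [List.append_assoc] at this ⊢
          simpa using this
        have hnew : ∀ p ∈ B1 ++ [x], p.1 = 1 := by
          intro p hp
          rcases List.mem_append.1 hp with hp | hp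
          · exact h1 p hp
          · have hpx : p = x := by simpa using hp
            rw [hpx]; exact hx
        simp only [List.foldl_cons, hstep]
        rw [ih B0 (B1 ++ [x]) B2 B3 h0 hnew h2 h3 ht]
        simp [hx, List.append_assoc]
      · have hstep : PySem.List.insertBy (fun a b => decide (a.1 < b.1)) x (B0 ++ B1 ++ B2 ++ B3)
            = B0 ++ B1 ++ (B2 ++ [x]) ++ B3 := by
          have := insertBy_split (fun a b : Int × String => decide (a.1 < b.1)) x (B0 ++ B1 ++ B2) B3
            (fun a ha => by
              simp only [List.append_assoc, List.mem_append] at ha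
              rcases ha with ha | ha | ha
              · simp [h0 a ha, hx]
              · simp [h1 a ha, hx]
              · simp [h2 a ha, hx])
            (fun b hb => by simp [h3 b hb, hx])
          simp only [List.append_assoc] at this ⊢
          simpa using this
        have hnew : ∀ p ∈ B2 ++ [x], p.1 = 2 := by
          intro p hp
          rcases List.mem_append.1 hp with hp | hp
          · exact h2 p hp
          · have hpx : p = x := by simpa using hp
            rw [hpx]; exact hx
        simp only [List.foldl_cons, hstep]
        rw [ih B0 B1 (B2 ++ [x]) B3 h0 h1 hnew h3 ht]
        simp [hx, List.append_assoc]
      · have hstep : PySem.List.insertBy (fun a b => decide (a.1 < b.1)) x (B0 ++ B1 ++ B2 ++ B3)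
            = B0 ++ B1 ++ B2 ++ (B3 ++ [x]) := by
          have := PySem.List.insertBy_of_forall_not_before (fun a b : Int × String => decide (a.1 < b.1)) x
            (B0 ++ B1 ++ B2 ++ B3)
            (fun y hy => by
              simp only [List.append_assoc, List.mem_append] at hy
              rcases hy with hy | hy | hy | hy
              · simp [h0 y hy, hx]
              · simp [h1 y hy, hx]
              · simp [h2 y hy, hx]
              · simp [h3 y hy, hx])
          simp only [List.append_assoc] at this ⊢
          simpa using this
        have hnew : ∀ p ∈ B3 ++ [x], p.1 = 3 := by
          intro p hp
          rcases List.mem_append.1 hp with hp | hp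
          · exact h3 p hp
          · have hpx : p = x := by simpa using hp
            rw [hpx]; exact hx
        simp only [List.foldl_cons, hstep]
        rw [ih B0 B1 B2 (B3 ++ [x]) h0 h1 h2 hnew ht]
        simp [hx, List.append_assoc]

-- A's stable sort on a 4-valued key is the concatenation of the four key-filters
lemma sorted_pvScore_eq (paths : List String) :
    PySem.List.sorted (paths.map pvScore) (fun item => item.1) false
      = (paths.map pvScore).filter (fun p => p.1 == 0)
        ++ (paths.map pvScore).filter (fun p => p.1 == 1)
        ++ (paths.map pvScore).filter (fun p => p.1 == 2)
        ++ (paths.map pvScore).filter (fun p => p.1 == 3) := by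
  rw [PySem.List.sorted_eq_foldl_insertBy]
  have := foldl_insertBy_buckets (paths.map pvScore) [] [] [] []
    (by simp) (by simp) (by simp) (by simp)
    (by intro p hp; rcases List.mem_map.1 hp with ⟨s, _, rfl⟩; exact pvScore_key s)
  simpa [List.append_assoc] using this

-- B's fold fills exactly the four key-filters (mapped to their strings)
lemma foldl_bucketStep (paths : List String) :
    ∀ (b0 b1 b2 b3 : List String),
      paths.foldl pvBucketStep (b0, b1, b2, b3)
      = (b0 ++ (((paths.map pvScore).filter (fun p => p.1 == 0)).map (fun p => p.2)),
         b1 ++ (((paths.map pvScore).filter (fun p => p.1 == 1)).map (fun p => p.2)),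
         b2 ++ (((paths.map pvScore).filter (fun p => p.1 == 2)).map (fun p => p.2)),
         b3 ++ (((paths.map pvScore).filter (fun p => p.1 == 3)).map (fun p => p.2))) := by
  induction paths with
  | nil => intro b0 b1 b2 b3; simp
  | cons p t ih =>
      intro b0 b1 b2 b3
      simp only [List.foldl_cons, List.map_cons, List.filter_cons, pvBucketStep, pvScore,
        PySem.Str.isIn, PySem.Str.strip]
      by_cases h1 : PySem.Chars.isIn ['/', 'p', 'a', 'g', 'e', 's', '/'] (PySem.Chars.strip p.toList) = true
      · simp [h1, ih, List.append_assoc]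
      · by_cases h2 : PySem.Chars.isIn ['/', 'c', 'o', 'm', 'p', 'o', 'n', 'e', 'n', 't', 's', '/'] (PySem.Chars.strip p.toList) = true
        · simp [h1, h2, ih, List.append_assoc]
        · by_cases h3 : PySem.Chars.isIn ['/', 'l', 'i', 'b', '/'] (PySem.Chars.strip p.toList) = true
          · simp [h1, h2, h3, ih, List.append_assoc]
          · simp [h1, h2, h3, ih, List.append_assoc]

-- ===== VERDICT (by name: the statement is the Claim_ definition above) =====
theorem prioritized_frontend_tests_py_spec : Claim_equal_prioritized_frontend_tests_py := by
  intro paths _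
  show prioritized_frontend_tests_py paths = prioritized_frontend_tests_py_alt paths
  simp only [prioritized_frontend_tests_py, prioritized_frontend_tests_py_alt,
    sorted_pvScore_eq, foldl_bucketStep, List.map_append]
  simp [List.append_assoc]
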